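-- pv_equiv track=rewrite | github.com/tarball0/asciiiii | imgascii.py | getchar
-- ===== SOURCE A (Python) =====
-- def getchar(pixel_sum):
--     ranges = [
--         (0, 0, "#"),
--         (1, 100, "X"),
--         (100, 200, "%"),
--         (200, 300, "&"),
--         (300, 400, "*"),
--         (400, 500, "+"),
--         (500, 600, "/"),
--         (600, 700, "("),
--         (700, 750, "'"),
--         (750, float("inf"), " "),
--     ]
--     for start, end, char in ranges:
--         if start <= pixel_sum < end:
--             return char
--
--     return " "
-- ===== SOURCE B (Python) =====
-- def getchar(pixel_sum):
--     # Binary search over the sorted boundary array (bisect_right by hand):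
--     # chars[i] is the character for boundaries[i-1] <= pixel_sum < boundaries[i].
--     boundaries = [1, 100, 200, 300, 400, 500, 600, 700, 750]
--     chars = [" ", "X", "%", "&", "*", "+", "/", "(", "'", " "]
--     lo, hi = 0, 9
--     while lo < hi:
--         mid = (lo + hi) // 2
--         if pixel_sum < boundaries[mid]:
--             hi = mid
--         else:
--             lo = mid + 1
--     return chars[lo]
-- ===== Notes on version B (the rewrite author's own statement) =====
-- stated objective: alternative
-- what changed: Replaces the linear scan over (start,end,char) range triples (with a dead (0,0,'#') entry and a float('inf') sentinel) by a hand-written bisect_right binary search over a sorted boundary array with a parallel character table.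
import Mathlib
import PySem

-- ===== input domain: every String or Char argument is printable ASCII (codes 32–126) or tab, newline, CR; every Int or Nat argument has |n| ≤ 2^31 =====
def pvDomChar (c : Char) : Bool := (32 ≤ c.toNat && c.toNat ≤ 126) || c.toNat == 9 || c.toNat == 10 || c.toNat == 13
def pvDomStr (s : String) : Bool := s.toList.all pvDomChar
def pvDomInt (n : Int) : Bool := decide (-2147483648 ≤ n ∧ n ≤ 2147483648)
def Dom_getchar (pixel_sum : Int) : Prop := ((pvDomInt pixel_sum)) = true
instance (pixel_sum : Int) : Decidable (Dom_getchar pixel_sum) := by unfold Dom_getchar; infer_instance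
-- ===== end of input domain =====

-- B replaces A's linear scan over range triples with a binary search over a sorted boundary array (alternative, same cost at this size).


-- ===== PORT A =====
-- The range ends are Option Int: 'none' stands for float("inf"); for an int pixel_sum,
-- 'pixel_sum < float("inf")' is always true, which is exactly what the 'none' branch encodes.
def getcharRanges : List (Int × Option Int × String) :=
  [(0, some 0, "#"), (1, some 100, "X"), (100, some 200, "%"), (200, some 300, "&"),
   (300, some 400, "*"), (400, some 500, "+"), (500, some 600, "/"), (600, some 700, "("),
   (700, some 750, "'"), (750, none, " ")]

def getcharLoop (rs : List (Int × Option Int × String)) (pixel_sum : Int) : String :=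
  match rs with
  | [] => " "
  | (start, «end», char) :: rest =>
    if start ≤ pixel_sum ∧ («end».all (fun e => decide (pixel_sum < e))) = true then char
    else getcharLoop rest pixel_sum

def getchar (pixel_sum : Int) : String := getcharLoop getcharRanges pixel_sum

-- ===== PORT B =====
-- hand-written bisect_right; lo/hi stay within [0,9] so boundaries[mid] is always in range
def bisectLoop (boundaries : List Int) (pixel_sum : Int) (lo hi : Nat) : Nat :=
  if lo < hi then
    let mid := (lo + hi) / 2
    if pixel_sum < boundaries.getD mid 0 then bisectLoop boundaries pixel_sum lo mid
    else bisectLoop boundaries pixel_sum (mid + 1) hi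
  else lo
termination_by hi - lo
decreasing_by all_goals omega

def getchar_alt (pixel_sum : Int) : String :=
  let boundaries : List Int := [1, 100, 200, 300, 400, 500, 600, 700, 750]
  let chars : List String := [" ", "X", "%", "&", "*", "+", "/", "(", "'", " "]
  chars.getD (bisectLoop boundaries pixel_sum 0 9) " "

-- ===== PRECONDITION & SPEC =====
def Spec_getchar (pixel_sum : Int) (out : String) : Prop := out = getchar_alt pixel_sum
instance (pixel_sum : Int) (out : String) : Decidable (Spec_getchar pixel_sum out) := by unfold Spec_getchar; infer_instance

-- ===== CLAIM (what is proved, stated in full; the proofs are below) =====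
def Claim_equal_getchar : Prop := ∀ (pixel_sum : Int), Dom_getchar pixel_sum → Spec_getchar pixel_sum (getchar pixel_sum)

-- ===== LEMMAS AND PROOFS =====

-- ===== VERDICT (by name: the statement is the Claim_ definition above) =====
theorem getchar_spec : Claim_equal_getchar := by
  intro x _
  show getchar x = getchar_alt x
  by_cases h0 : x < 0
  · simp [getchar, getcharRanges, getcharLoop, getchar_alt, bisectLoop, (show x < 0 by omega), (show ¬ 0 ≤ x by omega), (show x < 1 by omega), (show ¬ 1 ≤ x by omega), (show x < 100 by omega), (show ¬ 100 ≤ x by omega), (show x < 200 by omega), (show ¬ 200 ≤ x by omega), (show x < 300 by omega), (show ¬ 300 ≤ x by omega), (show x < 400 by omega), (show ¬ 400 ≤ x by omega), (show x < 500 by omega), (show ¬ 500 ≤ x by omega), (show x < 600 by omega), (show ¬ 600 ≤ x by omega), (show x < 700 by omega), (show ¬ 700 ≤ x by omega), (show x < 750 by omega), (show ¬ 750 ≤ x by omega)]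
  by_cases h1 : x < 1
  · simp [getchar, getcharRanges, getcharLoop, getchar_alt, bisectLoop, (show ¬ x < 0 by omega), (show 0 ≤ x by omega), (show x < 1 by omega), (show ¬ 1 ≤ x by omega), (show x < 100 by omega), (show ¬ 100 ≤ x by omega), (show x < 200 by omega), (show ¬ 200 ≤ x by omega), (show x < 300 by omega), (show ¬ 300 ≤ x by omega), (show x < 400 by omega), (show ¬ 400 ≤ x by omega), (show x < 500 by omega), (show ¬ 500 ≤ x by omega), (show x < 600 by omega), (show ¬ 600 ≤ x by omega), (show x < 700 by omega), (show ¬ 700 ≤ x by omega), (show x < 750 by omega), (show ¬ 750 ≤ x by omega)]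
  by_cases h2 : x < 100
  · simp [getchar, getcharRanges, getcharLoop, getchar_alt, bisectLoop, (show ¬ x < 0 by omega), (show 0 ≤ x by omega), (show ¬ x < 1 by omega), (show 1 ≤ x by omega), (show x < 100 by omega), (show ¬ 100 ≤ x by omega), (show x < 200 by omega), (show ¬ 200 ≤ x by omega), (show x < 300 by omega), (show ¬ 300 ≤ x by omega), (show x < 400 by omega), (show ¬ 400 ≤ x by omega), (show x < 500 by omega), (show ¬ 500 ≤ x by omega), (show x < 600 by omega), (show ¬ 600 ≤ x by omega), (show x < 700 by omega), (show ¬ 700 ≤ x by omega), (show x < 750 by omega), (show ¬ 750 ≤ x by omega)]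
  by_cases h3 : x < 200
  · simp [getchar, getcharRanges, getcharLoop, getchar_alt, bisectLoop, (show ¬ x < 0 by omega), (show 0 ≤ x by omega), (show ¬ x < 1 by omega), (show 1 ≤ x by omega), (show ¬ x < 100 by omega), (show 100 ≤ x by omega), (show x < 200 by omega), (show ¬ 200 ≤ x by omega), (show x < 300 by omega), (show ¬ 300 ≤ x by omega), (show x < 400 by omega), (show ¬ 400 ≤ x by omega), (show x < 500 by omega), (show ¬ 500 ≤ x by omega), (show x < 600 by omega), (show ¬ 600 ≤ x by omega), (show x < 700 by omega), (show ¬ 700 ≤ x by omega), (show x < 750 by omega), (show ¬ 750 ≤ x by omega)]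
  by_cases h4 : x < 300
  · simp [getchar, getcharRanges, getcharLoop, getchar_alt, bisectLoop, (show ¬ x < 0 by omega), (show 0 ≤ x by omega), (show ¬ x < 1 by omega), (show 1 ≤ x by omega), (show ¬ x < 100 by omega), (show 100 ≤ x by omega), (show ¬ x < 200 by omega), (show 200 ≤ x by omega), (show x < 300 by omega), (show ¬ 300 ≤ x by omega), (show x < 400 by omega), (show ¬ 400 ≤ x by omega), (show x < 500 by omega), (show ¬ 500 ≤ x by omega), (show x < 600 by omega), (show ¬ 600 ≤ x by omega), (show x < 700 by omega), (show ¬ 700 ≤ x by omega), (show x < 750 by omega), (show ¬ 750 ≤ x by omega)]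
  by_cases h5 : x < 400
  · simp [getchar, getcharRanges, getcharLoop, getchar_alt, bisectLoop, (show ¬ x < 0 by omega), (show 0 ≤ x by omega), (show ¬ x < 1 by omega), (show 1 ≤ x by omega), (show ¬ x < 100 by omega), (show 100 ≤ x by omega), (show ¬ x < 200 by omega), (show 200 ≤ x by omega), (show ¬ x < 300 by omega), (show 300 ≤ x by omega), (show x < 400 by omega), (show ¬ 400 ≤ x by omega), (show x < 500 by omega), (show ¬ 500 ≤ x by omega), (show x < 600 by omega), (show ¬ 600 ≤ x by omega), (show x < 700 by omega), (show ¬ 700 ≤ x by omega), (show x < 750 by omega), (show ¬ 750 ≤ x by omega)]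
  by_cases h6 : x < 500
  · simp [getchar, getcharRanges, getcharLoop, getchar_alt, bisectLoop, (show ¬ x < 0 by omega), (show 0 ≤ x by omega), (show ¬ x < 1 by omega), (show 1 ≤ x by omega), (show ¬ x < 100 by omega), (show 100 ≤ x by omega), (show ¬ x < 200 by omega), (show 200 ≤ x by omega), (show ¬ x < 300 by omega), (show 300 ≤ x by omega), (show ¬ x < 400 by omega), (show 400 ≤ x by omega), (show x < 500 by omega), (show ¬ 500 ≤ x by omega), (show x < 600 by omega), (show ¬ 600 ≤ x by omega), (show x < 700 by omega), (show ¬ 700 ≤ x by omega), (show x < 750 by omega), (show ¬ 750 ≤ x by omega)]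
  by_cases h7 : x < 600
  · simp [getchar, getcharRanges, getcharLoop, getchar_alt, bisectLoop, (show ¬ x < 0 by omega), (show 0 ≤ x by omega), (show ¬ x < 1 by omega), (show 1 ≤ x by omega), (show ¬ x < 100 by omega), (show 100 ≤ x by omega), (show ¬ x < 200 by omega), (show 200 ≤ x by omega), (show ¬ x < 300 by omega), (show 300 ≤ x by omega), (show ¬ x < 400 by omega), (show 400 ≤ x by omega), (show ¬ x < 500 by omega), (show 500 ≤ x by omega), (show x < 600 by omega), (show ¬ 600 ≤ x by omega), (show x < 700 by omega), (show ¬ 700 ≤ x by omega), (show x < 750 by omega), (show ¬ 750 ≤ x by omega)]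
  by_cases h8 : x < 700
  · simp [getchar, getcharRanges, getcharLoop, getchar_alt, bisectLoop, (show ¬ x < 0 by omega), (show 0 ≤ x by omega), (show ¬ x < 1 by omega), (show 1 ≤ x by omega), (show ¬ x < 100 by omega), (show 100 ≤ x by omega), (show ¬ x < 200 by omega), (show 200 ≤ x by omega), (show ¬ x < 300 by omega), (show 300 ≤ x by omega), (show ¬ x < 400 by omega), (show 400 ≤ x by omega), (show ¬ x < 500 by omega), (show 500 ≤ x by omega), (show ¬ x < 600 by omega), (show 600 ≤ x by omega), (show x < 700 by omega), (show ¬ 700 ≤ x by omega), (show x < 750 by omega), (show ¬ 750 ≤ x by omega)]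
  by_cases h9 : x < 750
  · simp [getchar, getcharRanges, getcharLoop, getchar_alt, bisectLoop, (show ¬ x < 0 by omega), (show 0 ≤ x by omega), (show ¬ x < 1 by omega), (show 1 ≤ x by omega), (show ¬ x < 100 by omega), (show 100 ≤ x by omega), (show ¬ x < 200 by omega), (show 200 ≤ x by omega), (show ¬ x < 300 by omega), (show 300 ≤ x by omega), (show ¬ x < 400 by omega), (show 400 ≤ x by omega), (show ¬ x < 500 by omega), (show 500 ≤ x by omega), (show ¬ x < 600 by omega), (show 600 ≤ x by omega), (show ¬ x < 700 by omega), (show 700 ≤ x by omega), (show x < 750 by omega), (show ¬ 750 ≤ x by omega)]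
  · simp [getchar, getcharRanges, getcharLoop, getchar_alt, bisectLoop, (show ¬ x < 0 by omega), (show 0 ≤ x by omega), (show ¬ x < 1 by omega), (show 1 ≤ x by omega), (show ¬ x < 100 by omega), (show 100 ≤ x by omega), (show ¬ x < 200 by omega), (show 200 ≤ x by omega), (show ¬ x < 300 by omega), (show 300 ≤ x by omega), (show ¬ x < 400 by omega), (show 400 ≤ x by omega), (show ¬ x < 500 by omega), (show 500 ≤ x by omega), (show ¬ x < 600 by omega), (show 600 ≤ x by omega), (show ¬ x < 700 by omega), (show 700 ≤ x by omega), (show ¬ x < 750 by omega), (show 750 ≤ x by omega)]
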